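-- pv_equiv track=rewrite | github.com/issaa71/NBA_RL_4030 | 00_pull_player_stats.py | get_position_group
-- ===== SOURCE A (Python) =====
-- def get_position_group(position_str: str) -> str:
--     """Map NBA position string to 'bigs' or 'perimeter'."""
--     if not position_str:
--         return "perimeter"
--     pos = position_str.upper().strip()
--     big_patterns = ["C", "PF", "C-F", "F-C"]
--     for p in big_patterns:
--         if pos == p or pos.startswith(p + "-") or pos.endswith("-" + p):
--             return "bigs"
--     return "perimeter"
-- ===== SOURCE B (Python) =====
-- def get_position_group(position_str: str) -> str:
--     """Map NBA position string to 'bigs' or 'perimeter'."""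
--     if not position_str:
--         return "perimeter"
--     tokens = position_str.upper().strip().split("-")
--     if tokens[0] in ("C", "PF") or tokens[-1] in ("C", "PF") \
--        or tokens[:2] == ["F", "C"] or tokens[-2:] == ["C", "F"]:
--         return "bigs"
--     return "perimeter"
-- ===== Notes on version B (the rewrite author's own statement) =====
-- stated objective: simpler
-- what changed: Replaces A's four-pattern loop of equality/startswith/endswith string tests by a single dash-separator tokenization that classifies from the first/last one or two tokens.
import Mathlib
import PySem

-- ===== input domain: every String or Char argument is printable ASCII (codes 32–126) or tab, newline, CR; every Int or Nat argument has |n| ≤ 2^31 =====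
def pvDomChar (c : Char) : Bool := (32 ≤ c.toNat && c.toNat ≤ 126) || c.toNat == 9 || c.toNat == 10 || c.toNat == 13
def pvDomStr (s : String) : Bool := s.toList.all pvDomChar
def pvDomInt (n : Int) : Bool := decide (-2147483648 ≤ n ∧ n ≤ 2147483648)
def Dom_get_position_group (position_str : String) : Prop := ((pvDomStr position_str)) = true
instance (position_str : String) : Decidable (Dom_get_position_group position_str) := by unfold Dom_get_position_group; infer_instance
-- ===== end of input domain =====

-- B replaces A's four-pattern equality/startswith/endswith loop by one dash-separator tokenization
-- that classifies from the first/last one or two tokens (simpler; same return value).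

-- ===== PORT A =====
def get_position_group (position_str : String) : String :=
  if position_str.toList = [] then "perimeter"
  else
    let pos := PySem.Chars.strip (PySem.Chars.upper position_str.toList)
    let bigPatterns : List (List Char) := [['C'], ['P','F'], ['C','-','F'], ['F','-','C']]
    if bigPatterns.any (fun p =>
        pos == p || PySem.Chars.startswith pos (p ++ ['-']) || PySem.Chars.endswith pos (['-'] ++ p))
    then "bigs" else "perimeter"

-- ===== PORT B =====
def get_position_group_alt (position_str : String) : String :=
  if position_str.toList = [] then "perimeter"
  else
    let tokens := (PySem.Chars.strip (PySem.Chars.upper position_str.toList)).splitOn '-'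
    if (PySem.List.pyGet? tokens 0 == some ['C'] || PySem.List.pyGet? tokens 0 == some ['P','F'])
       || (PySem.List.pyGet? tokens (-1) == some ['C'] || PySem.List.pyGet? tokens (-1) == some ['P','F'])
       || PySem.List.slice tokens none (some 2) == [['F'], ['C']]
       || PySem.List.slice tokens (some (-2)) none == [['C'], ['F']]
    then "bigs" else "perimeter"

-- ===== PRECONDITION & SPEC =====
def Spec_get_position_group (position_str : String) (out : String) : Prop := out = get_position_group_alt position_str
instance (position_str : String) (out : String) : Decidable (Spec_get_position_group position_str out) := by unfold Spec_get_position_group; infer_instance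

-- ===== CLAIM (what is proved, stated in full; the proofs are below) =====
def Claim_equal_get_position_group : Prop := ∀ (position_str : String), Dom_get_position_group position_str → Spec_get_position_group position_str (get_position_group position_str)

-- ===== LEMMAS AND PROOFS =====

-- first token of a '-'-split is the longest dash-free prefix
theorem pv_head_splitOnP (l : List Char) :
    (l.splitOnP (· == '-')).head? = some (l.takeWhile (fun c => !(c == '-'))) := by
  induction l with
  | nil => rfl
  | cons c xs ih =>
    by_cases h : c = '-'
    · simp [List.splitOnP_cons, h]
    · simp [List.splitOnP_cons, h, List.head?_modifyHead, ih, List.takeWhile_cons]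

theorem pv_takeWhile_eq_iff (w : List Char) (hw : '-' ∉ w) (l : List Char) :
    l.takeWhile (fun c => !(c == '-')) = w ↔ (l = w ∨ w ++ ['-'] <+: l) := by
  induction w generalizing l with
  | nil =>
    cases l with
    | nil => simp
    | cons c m =>
      by_cases h : c = '-'
      · simp [List.takeWhile_cons, h, List.cons_prefix_cons]
      · simp [List.takeWhile_cons, h, List.cons_prefix_cons, Ne.symm h]
  | cons a w' ih =>
    have ha : a ≠ '-' := fun h => hw (h ▸ List.mem_cons_self)
    have hw' : '-' ∉ w' := fun h => hw (List.mem_cons_of_mem _ h)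
    cases l with
    | nil => simp
    | cons c m =>
      by_cases h : c = '-'
      · subst h
        simp [List.takeWhile_cons, List.cons_prefix_cons, Ne.symm ha, ha]
      · simp [List.takeWhile_cons, h, List.cons_prefix_cons, ih hw' m]
        constructor
        · rintro ⟨rfl, h' | h'⟩
          · exact Or.inl ⟨rfl, h'⟩
          · exact Or.inr ⟨rfl, h'⟩
        · rintro (⟨rfl, rfl⟩ | ⟨rfl, h'⟩)
          · exact ⟨rfl, Or.inl rfl⟩
          · exact ⟨rfl, Or.inr h'⟩

theorem pv_firstTok_iff (w : List Char) (hw : '-' ∉ w) (l : List Char) :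
    (l.splitOnP (· == '-')).head? = some w ↔ (l = w ∨ w ++ ['-'] <+: l) := by
  rw [pv_head_splitOnP, Option.some_inj, pv_takeWhile_eq_iff w hw]

-- splitting the reverse reverses the (reversed) pieces
theorem pv_splitOnP_reverse : ∀ (n : Nat) (l : List Char), l.length = n →
    (l.reverse).splitOnP (· == '-') = ((l.splitOnP (· == '-')).map List.reverse).reverse := by
  intro n
  induction n using Nat.strong_induction_on with
  | _ n ih =>
    intro l hn
    by_cases h : '-' ∈ l
    · -- split at the first '-'
      have hrest : l.dropWhile (fun c => !(c == '-')) ≠ [] := by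
        intro hnil
        rw [List.dropWhile_eq_nil_iff] at hnil
        simpa using hnil '-' h
      obtain ⟨c, ys, hcys⟩ := List.exists_cons_of_ne_nil hrest
      have hc : c = '-' := by
        have h5 := List.head_dropWhile_not (fun c => !(c == '-')) hrest
        have h6 : (List.dropWhile (fun c => !(c == '-')) l).head hrest = c := by
          simp [hcys]
        rw [h6] at h5
        simpa using h5
      have hdecomp : l = l.takeWhile (fun c => !(c == '-')) ++ '-' :: ys := by
        conv_lhs => rw [← List.takeWhile_append_dropWhile (p := fun c => !(c == '-')) (l := l)]
        rw [hcys, hc]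
      set xs := l.takeWhile (fun c => !(c == '-')) with hxs
      have hxsfree : ∀ x ∈ xs, ¬ ((x == '-') = true) := by
        intro x hx
        have := List.mem_takeWhile_imp hx
        simpa using this
      have hxsfree' : ∀ x ∈ xs.reverse, ¬ ((x == '-') = true) := by
        intro x hx; exact hxsfree x (List.mem_reverse.mp hx)
      have hys : ys.length < n := by
        subst hn; rw [hdecomp]; simp; omega
      have ihys := ih ys.length hys ys rfl
      rw [hdecomp, List.splitOnP_first _ xs hxsfree '-' (by simp) ys]
      have hrev2 : (xs ++ '-' :: ys).reverse = ys.reverse ++ '-' :: xs.reverse := by simp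
      rw [hrev2, List.splitOnP_append_cons _ ys.reverse xs.reverse '-' (by simp),
        List.splitOnP_eq_single _ _ hxsfree', ihys]
      simp
    · have hfree : ∀ x ∈ l, ¬ ((x == '-') = true) := by
        intro x hx; simp; rintro rfl; exact h hx
      have hfree' : ∀ x ∈ l.reverse, ¬ ((x == '-') = true) := by
        intro x hx; exact hfree x (List.mem_reverse.mp hx)
      rw [List.splitOnP_eq_single _ _ hfree, List.splitOnP_eq_single _ _ hfree']
      simp

theorem pv_lastTok_iff (w : List Char) (hw : '-' ∉ w.reverse) (l : List Char) :
    (l.splitOnP (· == '-')).getLast? = some w ↔ (l = w ∨ ['-'] ++ w <:+ l) := by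
  have hrev := pv_splitOnP_reverse l.length l rfl
  have h1 : (l.splitOnP (· == '-')).getLast? = ((l.reverse.splitOnP (· == '-')).head?).map List.reverse := by
    rw [hrev, List.head?_reverse, List.getLast?_map]
    cases (List.splitOnP (fun x => x == '-') l).getLast? <;> simp
  rw [h1]
  have h2 := pv_firstTok_iff w.reverse hw l.reverse
  constructor
  · intro hmap
    cases hh : (l.reverse.splitOnP (· == '-')).head? with
    | none => rw [hh] at hmap; simp at hmap
    | some v =>
      rw [hh] at hmap
      simp at hmap
      have hv : v = w.reverse := by rw [← hmap]; simp
      rw [hv] at hh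
      rcases h2.mp hh with h3 | h3
      · left; have := congrArg List.reverse h3; simpa using this
      · right
        have h' : (['-'] ++ w : List Char).reverse <+: l.reverse := by simpa using h3
        exact List.reverse_prefix.mp h'
  · intro hlw
    have : l.reverse = w.reverse ∨ w.reverse ++ ['-'] <+: l.reverse := by
      rcases hlw with h3 | h3
      · left; rw [h3]
      · right
        simpa using List.reverse_prefix.mpr h3
    rw [h2.mpr this]
    simp

-- take 2 of the split: the first two tokens
theorem pv_take1_eq_iff (t : List (List Char)) (w : List Char) :
    t.take 1 = [w] ↔ t.head? = some w := by
  cases t with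
  | nil => simp
  | cons a t' => simp [List.take]

theorem pv_take2_iff (l : List Char) :
    (l.splitOnP (· == '-')).take 2 = [['F'], ['C']] ↔
      (l = ['F', '-', 'C'] ∨ ['F', '-', 'C', '-'] <+: l) := by
  constructor
  · intro ht
    have hh : (l.splitOnP (· == '-')).head? = some ['F'] := by
      cases hsp : l.splitOnP (· == '-') with
      | nil => rw [hsp] at ht; simp at ht
      | cons a t' =>
        rw [hsp] at ht
        cases t' <;> simp_all [List.take]
    rcases (pv_firstTok_iff ['F'] (by decide) l).mp hh with h1 | h1
    · rw [h1] at ht; simp [List.splitOnP_cons] at ht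
    · obtain ⟨m, hm⟩ := h1
      rw [← hm] at ht ⊢
      simp only [List.cons_append, List.nil_append] at ht ⊢
      rw [List.splitOnP_cons, List.splitOnP_cons] at ht
      simp at ht
      have ht' : (List.splitOnP (· == '-') m).take 1 = [['C']] := by
        cases hsp : m.splitOnP (· == '-') with
        | nil => exact absurd hsp (List.splitOnP_ne_nil _ m)
        | cons a t' => rw [hsp] at ht; simp_all [List.take]
      rw [pv_take1_eq_iff] at ht'
      rcases (pv_firstTok_iff ['C'] (by decide) m).mp ht' with h2 | h2
      · left; rw [h2]
      · right
        obtain ⟨m', hm'⟩ := h2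
        rw [← hm']
        exact ⟨m', by simp⟩
  · intro h
    rcases h with h | h
    · subst h; decide
    · obtain ⟨m, hm⟩ := h
      rw [← hm]
      simp only [List.cons_append, List.nil_append]
      rw [List.splitOnP_cons, List.splitOnP_cons, List.splitOnP_cons, List.splitOnP_cons]
      simp [List.take]

-- last two tokens via the reverse
theorem pv_last2_iff (l : List Char) :
    ((l.splitOnP (· == '-')).reverse.take 2).reverse = [['C'], ['F']] ↔
      (l = ['C', '-', 'F'] ∨ ['-', 'C', '-', 'F'] <:+ l) := by
  have hrev := pv_splitOnP_reverse l.length l rfl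
  have hmap : (l.splitOnP (· == '-')).reverse = (l.reverse.splitOnP (· == '-')).map List.reverse := by
    rw [hrev]; simp
  rw [List.reverse_eq_iff, hmap, ← List.map_take]
  have hiff : ((l.reverse.splitOnP (· == '-')).take 2).map List.reverse = [['F'], ['C']] ↔
      (l.reverse.splitOnP (· == '-')).take 2 = [['F'], ['C']] := by
    constructor
    · intro h
      have := congrArg (List.map List.reverse) h
      simpa using this
    · intro h; simp [h]
  rw [show ([['C'],['F']] : List (List Char)).reverse = [['F'],['C']] from rfl, hiff, pv_take2_iff]
  constructor
  · rintro (h | h)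
    · left; have := congrArg List.reverse h; simpa using this
    · right
      have h' : (['-','C','-','F'] : List Char).reverse <+: l.reverse := by simpa using h
      exact List.reverse_prefix.mp h'
  · rintro (h | h)
    · left; subst h; decide
    · right
      have h' := List.reverse_prefix.mpr h
      simpa using h'

-- B's primitives on a nonempty token list
theorem pv_pyGet_zero (t : List (List Char)) (h : t ≠ []) :
    PySem.List.pyGet? t 0 = t.head? := by
  cases t with
  | nil => exact absurd rfl h
  | cons a t' => simp [PySem.List.pyGet?, PySem.List.pyIdx?]

theorem pv_pyGet_neg_one (t : List (List Char)) (h : t ≠ []) :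
    PySem.List.pyGet? t (-1) = t.getLast? := by
  cases t with
  | nil => exact absurd rfl h
  | cons a t' =>
    simp only [PySem.List.pyGet?, PySem.List.pyIdx?]
    rw [if_neg (by omega), if_pos (by simp)]
    rw [List.getLast?_eq_getElem?]
    simp

theorem pv_slice_neg_two (t : List (List Char)) :
    PySem.List.slice t (some (-2)) none = (t.reverse.take 2).reverse := by
  rw [List.take_reverse, List.reverse_reverse]
  simp only [PySem.List.slice, PySem.List.clampIdx]
  rw [if_pos (by norm_num : (-2:Int) < 0)]
  by_cases h : (t.length : Int) + (-2) < 0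
  · rw [if_pos h]
    simp only [List.drop_zero, Nat.sub_zero, List.take_length]
    have h2 : t.length - 2 = 0 := by omega
    rw [h2, List.drop_zero]
  · rw [if_neg h]
    have ha : ((t.length : Int) + (-2)).toNat = t.length - 2 := by omega
    rw [ha, List.take_of_length_le (by simp)]

-- the central fact: A's pattern loop and B's token tests agree on every char list
theorem pv_cond_eq (l : List Char) :
    (([['C'], ['P','F'], ['C','-','F'], ['F','-','C']] : List (List Char)).any (fun p =>
        l == p || PySem.Chars.startswith l (p ++ ['-']) || PySem.Chars.endswith l (['-'] ++ p)))
    = ((PySem.List.pyGet? (l.splitOn '-') 0 == some ['C'] || PySem.List.pyGet? (l.splitOn '-') 0 == some ['P','F'])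
       || (PySem.List.pyGet? (l.splitOn '-') (-1) == some ['C'] || PySem.List.pyGet? (l.splitOn '-') (-1) == some ['P','F'])
       || PySem.List.slice (l.splitOn '-') none (some 2) == [['F'], ['C']]
       || PySem.List.slice (l.splitOn '-') (some (-2)) none == [['C'], ['F']]) := by
  have hne : l.splitOn '-' ≠ [] := List.splitOnP_ne_nil _ l
  rw [Bool.eq_iff_iff]
  simp only [List.any_cons, List.any_nil, Bool.or_eq_true, beq_iff_eq,
    PySem.Chars.startswith_iff, PySem.Chars.endswith_iff,
    pv_pyGet_zero _ hne, pv_pyGet_neg_one _ hne,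
    PySem.List.slice_to _ (by norm_num : (0:Int) ≤ 2), pv_slice_neg_two]
  unfold List.splitOn
  rw [show ((2:Int).toNat) = 2 from rfl]
  rw [pv_firstTok_iff ['C'] (by decide) l, pv_firstTok_iff ['P','F'] (by decide) l,
    pv_lastTok_iff ['C'] (by decide) l, pv_lastTok_iff ['P','F'] (by decide) l,
    pv_take2_iff l, pv_last2_iff l]
  simp only [List.cons_append, List.nil_append]
  have h1 : ['C', '-', 'F', '-'] <+: l → ['C', '-'] <+: l :=
    fun h => List.IsPrefix.trans (by decide) h
  have h2 : ['-', 'F', '-', 'C'] <:+ l → ['-', 'C'] <:+ l :=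
    fun h => List.IsSuffix.trans (by decide) h
  simp only [Bool.false_eq_true, or_false]
  tauto

-- ===== VERDICT (by name: the statement is the Claim_ definition above) =====
theorem get_position_group_spec : Claim_equal_get_position_group := by
  intro s _
  unfold Spec_get_position_group get_position_group get_position_group_alt
  by_cases h : s.toList = []
  · simp [h]
  · simp only [if_neg h, pv_cond_eq]
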